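-- pv_equiv track=rewrite | github.com/lx-0/pixel-realm | scripts/gen_production_sprites.py | overlay
-- ===== SOURCE A (Python) =====
-- def overlay(dst, src, x_off, y_off):
--     """Paste src onto dst at (x_off, y_off). Non-transparent pixels overwrite."""
--     for r, row in enumerate(src):
--         dr = r + y_off
--         if dr < 0 or dr >= len(dst): continue
--         for c, px in enumerate(row):
--             dc = c + x_off
--             if dc < 0 or dc >= len(dst[dr]): continue
--             if px[3] > 0:
--                 dst[dr][dc] = px
--     return dst
-- ===== SOURCE B (Python) =====
-- def overlay(dst, src, x_off, y_off):
--     """Paste src onto dst at (x_off, y_off). Non-transparent pixels overwrite.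
--
--     Gather formulation: rebuild the canvas from dst's perspective, reading the
--     matching src pixel for each destination cell (returns a fresh list; unlike
--     the original it does not mutate dst in place -- return value is the same).
--     """
--     h = len(src)
--     return [
--         [
--             src[i - y_off][j - x_off]
--             if 0 <= i - y_off < h
--             and 0 <= j - x_off < len(src[i - y_off])
--             and src[i - y_off][j - x_off][3] > 0
--             else px
--             for j, px in enumerate(drow)
--         ]
--         for i, drow in enumerate(dst)
--     ]
-- ===== Notes on version B (the rewrite author's own statement) =====
-- stated objective: alternative
-- what changed: A scatters: it iterates over src rows/pixels and writes in-bounds opaque pixels into dst in place; B gathers: it rebuilds the canvas as a nested comprehension over dst, looking up for each destination cell the unique src pixel that maps onto it (no mutation, no per-iteration skip guards).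
import Mathlib
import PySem

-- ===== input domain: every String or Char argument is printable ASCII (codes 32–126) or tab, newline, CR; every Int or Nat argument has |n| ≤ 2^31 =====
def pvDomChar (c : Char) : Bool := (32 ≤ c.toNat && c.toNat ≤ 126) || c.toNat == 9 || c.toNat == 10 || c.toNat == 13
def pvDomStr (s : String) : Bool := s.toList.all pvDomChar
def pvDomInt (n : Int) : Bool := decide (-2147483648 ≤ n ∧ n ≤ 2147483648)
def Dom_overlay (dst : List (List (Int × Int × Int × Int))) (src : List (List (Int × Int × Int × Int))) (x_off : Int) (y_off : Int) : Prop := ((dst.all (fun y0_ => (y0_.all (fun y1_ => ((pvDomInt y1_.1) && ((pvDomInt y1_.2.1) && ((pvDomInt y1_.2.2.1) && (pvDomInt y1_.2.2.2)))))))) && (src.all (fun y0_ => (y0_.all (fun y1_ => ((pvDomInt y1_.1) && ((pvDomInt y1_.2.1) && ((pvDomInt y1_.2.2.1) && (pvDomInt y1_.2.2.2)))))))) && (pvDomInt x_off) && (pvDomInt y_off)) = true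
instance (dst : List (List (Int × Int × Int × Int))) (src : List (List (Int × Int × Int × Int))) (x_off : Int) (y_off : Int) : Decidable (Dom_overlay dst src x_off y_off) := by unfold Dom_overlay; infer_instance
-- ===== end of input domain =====

-- B is an ALTERNATIVE decomposition: A scatters src pixels into dst by in-place writes,
-- B gathers — it rebuilds the canvas pixelwise from dst's perspective (return value only:
-- Python A mutates dst in place, Python B builds fresh lists; the returned value is equal).

-- ===== PORT A =====
-- inner loop: 'for c, px in enumerate(row): …' (c carried explicitly; dst[dr][dc] = px
-- is ported as setting row dr to its updated copy, exact since lists are values here)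
def overlayInner (d : List (List (Int × Int × Int × Int))) (dr : Nat) (c : Int)
    (row : List (Int × Int × Int × Int)) (x_off : Int) : List (List (Int × Int × Int × Int)) :=
  match row with
  | [] => d
  | px :: rest =>
    let dc := c + x_off
    let d' := if dc < 0 ∨ dc ≥ ((d.getD dr []).length : Int) then d
              else if px.2.2.2 > 0 then d.set dr ((d.getD dr []).set dc.toNat px) else d
    overlayInner d' dr (c + 1) rest x_off

-- outer loop: 'for r, row in enumerate(src): …'
def overlayOuter (d : List (List (Int × Int × Int × Int))) (r : Int)
    (src : List (List (Int × Int × Int × Int))) (x_off y_off : Int) : List (List (Int × Int × Int × Int)) :=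
  match src with
  | [] => d
  | row :: rest =>
    let dr := r + y_off
    let d' := if dr < 0 ∨ dr ≥ (d.length : Int) then d else overlayInner d dr.toNat 0 row x_off
    overlayOuter d' (r + 1) rest x_off y_off

def overlay (dst : List (List (Int × Int × Int × Int))) (src : List (List (Int × Int × Int × Int))) (x_off : Int) (y_off : Int) : List (List (Int × Int × Int × Int)) :=
  overlayOuter dst 0 src x_off y_off

-- ===== PORT B =====
def overlay_alt (dst : List (List (Int × Int × Int × Int))) (src : List (List (Int × Int × Int × Int))) (x_off : Int) (y_off : Int) : List (List (Int × Int × Int × Int)) :=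
  (PySem.List.enumerate dst).map (fun p =>
    (PySem.List.enumerate p.2).map (fun q =>
      let si := p.1 - y_off
      let sj := q.1 - x_off
      let srow := src.getD si.toNat []
      if 0 ≤ si ∧ si < (src.length : Int) ∧ 0 ≤ sj ∧ sj < (srow.length : Int) ∧
          (srow.getD sj.toNat (0, 0, 0, 0)).2.2.2 > 0
      then srow.getD sj.toNat (0, 0, 0, 0) else q.2))

-- ===== PRECONDITION & SPEC =====
def Spec_overlay (dst : List (List (Int × Int × Int × Int))) (src : List (List (Int × Int × Int × Int))) (x_off : Int) (y_off : Int) (out : List (List (Int × Int × Int × Int))) : Prop := out = overlay_alt dst src x_off y_off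
instance (dst : List (List (Int × Int × Int × Int))) (src : List (List (Int × Int × Int × Int))) (x_off : Int) (y_off : Int) (out : List (List (Int × Int × Int × Int))) : Decidable (Spec_overlay dst src x_off y_off out) := by unfold Spec_overlay; infer_instance

-- ===== CLAIM (what is proved, stated in full; the proofs are below) =====
def Claim_equal_overlay : Prop := ∀ (dst : List (List (Int × Int × Int × Int))) (src : List (List (Int × Int × Int × Int))) (x_off : Int) (y_off : Int), Dom_overlay dst src x_off y_off → Spec_overlay dst src x_off y_off (overlay dst src x_off y_off)

-- ===== LEMMAS AND PROOFS =====

-- the effect of A's inner loop on the one row it touches, as a plain row transformer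

def paint (rw : List (Int × Int × Int × Int)) (c : Int)
    (row : List (Int × Int × Int × Int)) (x_off : Int) : List (Int × Int × Int × Int) :=
  match row with
  | [] => rw
  | px :: rest =>
    paint (if c + x_off < 0 ∨ c + x_off ≥ (rw.length : Int) then rw
           else if px.2.2.2 > 0 then rw.set (c + x_off).toNat px else rw) (c + 1) rest x_off

theorem paint_length (row : List (Int × Int × Int × Int)) (rw : List (Int × Int × Int × Int))
    (c : Int) (x_off : Int) : (paint rw c row x_off).length = rw.length := by
  induction row generalizing rw c with
  | nil => rfl
  | cons px rest ih => rw [paint, ih]; split_ifs <;> simp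

theorem paint_getD (row : List (Int × Int × Int × Int)) (rw : List (Int × Int × Int × Int))
    (c : Int) (x_off : Int) (j : Nat) (hj : j < rw.length) :
    (paint rw c row x_off).getD j (0,0,0,0) =
      if 0 ≤ (j : Int) - x_off - c ∧ (j : Int) - x_off - c < row.length ∧
          (row.getD ((j : Int) - x_off - c).toNat (0,0,0,0)).2.2.2 > 0
      then row.getD ((j : Int) - x_off - c).toNat (0,0,0,0)
      else rw.getD j (0,0,0,0) := by
  induction row generalizing rw c with
  | nil =>
    rw [paint, if_neg]
    intro h
    have h2 := h.2.1
    simp at h2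
    omega
  | cons px rest ih =>
    rw [paint]
    have hl : (if c + x_off < 0 ∨ c + x_off ≥ (rw.length : Int) then rw
           else if px.2.2.2 > 0 then rw.set (c + x_off).toNat px else rw).length = rw.length := by
      split_ifs <;> simp
    rw [ih _ (c+1) (by rw [hl]; exact hj)]
    rcases lt_trichotomy ((j : Int) - x_off - c) 0 with ht | ht | ht
    · have hrw' : (if c + x_off < 0 ∨ c + x_off ≥ (rw.length : Int) then rw
           else if px.2.2.2 > 0 then rw.set (c + x_off).toNat px else rw).getD j (0,0,0,0)
          = rw.getD j (0,0,0,0) := by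
        split_ifs with hg hp
        · rfl
        · rw [not_or] at hg
          have hne : (c + x_off).toNat ≠ j := by omega
          simp [List.getD_eq_getElem?_getD, List.getElem?_set_ne hne]
        · rfl
      rw [hrw']
      have hA : ¬ (0 ≤ (j : Int) - x_off - (c+1) ∧ (j : Int) - x_off - (c+1) < (rest.length : Int) ∧
          (rest.getD ((j : Int) - x_off - (c+1)).toNat (0,0,0,0)).2.2.2 > 0) :=
        fun h => absurd h.1 (by omega)
      have hB : ¬ (0 ≤ (j : Int) - x_off - c ∧ (j : Int) - x_off - c < ((px :: rest).length : Int) ∧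
          ((px :: rest).getD ((j : Int) - x_off - c).toNat (0,0,0,0)).2.2.2 > 0) :=
        fun h => absurd h.1 (by omega)
      rw [if_neg hA, if_neg hB]
    · have hA : ¬ (0 ≤ (j : Int) - x_off - (c+1) ∧ (j : Int) - x_off - (c+1) < (rest.length : Int) ∧
          (rest.getD ((j : Int) - x_off - (c+1)).toNat (0,0,0,0)).2.2.2 > 0) :=
        fun h => absurd h.1 (by omega)
      rw [if_neg hA]
      have h1 : ¬ (c + x_off < 0 ∨ c + x_off ≥ (rw.length : Int)) := by
        rw [not_or]; constructor <;> omega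
      rw [if_neg h1]
      have htn : ((j : Int) - x_off - c).toNat = 0 := by omega
      rw [htn]
      simp only [List.getD_cons_zero]
      by_cases h2 : px.2.2.2 > 0
      · have hB : 0 ≤ (j : Int) - x_off - c ∧ (j : Int) - x_off - c < ((px :: rest).length : Int) ∧
            px.2.2.2 > 0 := ⟨by omega, by simp only [List.length_cons]; push_cast; omega, h2⟩
        rw [if_pos h2, if_pos hB]
        have hjj : (c + x_off).toNat = j := by omega
        simp [hjj, List.getD_eq_getElem?_getD, hj]
      · have hB : ¬ (0 ≤ (j : Int) - x_off - c ∧ (j : Int) - x_off - c < ((px :: rest).length : Int) ∧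
            px.2.2.2 > 0) := fun h => h2 h.2.2
        rw [if_neg h2, if_neg hB]
    · have hrw' : (if c + x_off < 0 ∨ c + x_off ≥ (rw.length : Int) then rw
           else if px.2.2.2 > 0 then rw.set (c + x_off).toNat px else rw).getD j (0,0,0,0)
          = rw.getD j (0,0,0,0) := by
        split_ifs with hg hp
        · rfl
        · rw [not_or] at hg
          have hne : (c + x_off).toNat ≠ j := by omega
          simp [List.getD_eq_getElem?_getD, List.getElem?_set_ne hne]
        · rfl
      rw [hrw']
      have hsh : ((j : Int) - x_off - (c + 1)).toNat + 1 = ((j : Int) - x_off - c).toNat := by omega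
      have hget : rest.getD ((j : Int) - x_off - (c+1)).toNat (0,0,0,0)
          = (px :: rest).getD ((j : Int) - x_off - c).toNat (0,0,0,0) := by
        rw [← hsh]; rfl
      rw [hget]
      congr 1
      simp only [eq_iff_iff, List.length_cons]
      constructor
      · exact fun h => ⟨by omega, by push_cast; omega, h.2.2⟩
      · refine fun h => ⟨by omega, ?_, h.2.2⟩
        have := h.2.1; push_cast at this ⊢; omega


theorem inner_eq_paint (row : List (Int × Int × Int × Int))
    (d : List (List (Int × Int × Int × Int))) (dr : Nat) (c : Int) (x_off : Int)
    (hdr : dr < d.length) :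
    overlayInner d dr c row x_off = d.set dr (paint (d.getD dr []) c row x_off) := by
  induction row generalizing d c with
  | nil =>
    simp only [overlayInner, paint]
    rw [List.getD_eq_getElem?_getD, List.getElem?_eq_getElem hdr]
    simp
  | cons px rest ih =>
    simp only [overlayInner, paint]
    by_cases h1 : c + x_off < 0 ∨ c + x_off ≥ (((d.getD dr []).length : Nat) : Int)
    · rw [if_pos h1, if_pos h1]
      exact ih d (c + 1) hdr
    · rw [if_neg h1, if_neg h1]
      by_cases h2 : px.2.2.2 > 0
      · rw [if_pos h2, if_pos h2]
        rw [ih (d.set dr ((d.getD dr []).set (c + x_off).toNat px)) (c + 1) (by simpa using hdr)]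
        have hget : (d.set dr ((d.getD dr []).set (c + x_off).toNat px)).getD dr []
            = (d.getD dr []).set (c + x_off).toNat px := by
          simp [List.getD_eq_getElem?_getD, hdr]
        rw [hget, List.set_set]
      · rw [if_neg h2, if_neg h2]
        exact ih d (c + 1) hdr

theorem outer_length (src : List (List (Int × Int × Int × Int)))
    (d : List (List (Int × Int × Int × Int))) (r : Int) (x_off y_off : Int) :
    (overlayOuter d r src x_off y_off).length = d.length := by
  induction src generalizing d r with
  | nil => rfl
  | cons row rest ih =>
    simp only [overlayOuter]
    rw [ih]
    split_ifs with h
    · rfl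
    · rw [inner_eq_paint row d _ 0 x_off (by omega)]
      simp

-- shifting the outer row index by one step
theorem getD_cons_shift {α : Type} (z : α) (hd : α) (tl : List α) (a b : Int)
    (h : a + 1 = b) (h0 : 0 ≤ a) : tl.getD a.toNat z = (hd :: tl).getD b.toNat z := by
  have hb : b.toNat = a.toNat + 1 := by omega
  rw [hb]
  rfl

theorem cond_shift {α : Type} (i : Nat) (y r : Int) (row : α) (rest : List α)
    (hne : (i : Int) - y - r ≠ 0) :
    (0 ≤ (i : Int) - y - (r + 1) ∧ (i : Int) - y - (r + 1) < (rest.length : Int)) ↔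
      (0 ≤ (i : Int) - y - r ∧ (i : Int) - y - r < ((row :: rest).length : Int)) := by
  simp only [List.length_cons]
  push_cast
  omega

theorem outer_getD (src : List (List (Int × Int × Int × Int)))
    (d : List (List (Int × Int × Int × Int))) (r : Int) (x_off y_off : Int)
    (i : Nat) (hi : i < d.length) :
    (overlayOuter d r src x_off y_off).getD i [] =
      if 0 ≤ (i : Int) - y_off - r ∧ (i : Int) - y_off - r < (src.length : Int)
      then paint (d.getD i []) 0 (src.getD ((i : Int) - y_off - r).toNat []) x_off
      else d.getD i [] := by
  induction src generalizing d r with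
  | nil =>
    simp only [overlayOuter]
    rw [if_neg]
    intro h
    have h2 := h.2
    simp at h2
    omega
  | cons row rest ih =>
    simp only [overlayOuter]
    by_cases hg : r + y_off < 0 ∨ r + y_off ≥ (d.length : Int)
    · rw [if_pos hg]
      rw [ih d (r + 1) hi]
      have hne : (i : Int) - y_off - r ≠ 0 := by rcases hg with h | h <;> omega
      simp only [cond_shift i y_off r row rest hne]
      split_ifs with hc
      · rw [getD_cons_shift [] row rest ((i : Int) - y_off - (r + 1)) ((i : Int) - y_off - r)
          (by ring) (by omega)]
      · rfl
    · rw [if_neg hg]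
      rw [not_or] at hg
      rw [inner_eq_paint row d (r + y_off).toNat 0 x_off (by omega)]
      have hlen : (d.set (r + y_off).toNat (paint (d.getD (r + y_off).toNat []) 0 row x_off)).length
          = d.length := by simp
      rw [ih _ (r + 1) (by rw [hlen]; exact hi)]
      by_cases he : (i : Int) - y_off - r = 0
      · have hii : (r + y_off).toNat = i := by omega
        have hc' : ¬ (0 ≤ (i : Int) - y_off - (r + 1) ∧
            (i : Int) - y_off - (r + 1) < (rest.length : Int)) :=
          fun h => absurd h.1 (by omega)
        rw [if_neg hc']
        have hpos : 0 ≤ (i : Int) - y_off - r ∧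
            (i : Int) - y_off - r < ((row :: rest).length : Int) :=
          ⟨by omega, by simp only [List.length_cons]; push_cast; omega⟩
        rw [if_pos hpos]
        have htn : ((i : Int) - y_off - r).toNat = 0 := by omega
        rw [htn]
        simp only [List.getD_cons_zero]
        rw [hii]
        simp [List.getD_eq_getElem?_getD, hi]
      · have hne : (r + y_off).toNat ≠ i := by omega
        have hd2 : (d.set (r + y_off).toNat (paint (d.getD (r + y_off).toNat []) 0 row x_off)).getD i []
            = d.getD i [] := by
          simp [List.getD_eq_getElem?_getD, List.getElem?_set_ne hne]
        rw [hd2]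
        simp only [cond_shift i y_off r row rest he]
        split_ifs with hc
        · rw [getD_cons_shift [] row rest ((i : Int) - y_off - (r + 1)) ((i : Int) - y_off - r)
            (by ring) (by omega)]
        · rfl

-- B's inner map over one destination row equals A's effect on that row
theorem row_eq (src : List (List (Int × Int × Int × Int))) (x_off y_off : Int) (i : Nat)
    (drow : List (Int × Int × Int × Int)) :
    (if 0 ≤ (i : Int) - y_off ∧ (i : Int) - y_off < (src.length : Int)
     then paint drow 0 (src.getD ((i : Int) - y_off).toNat []) x_off
     else drow)
    = List.map (fun q : Int × (Int × Int × Int × Int) =>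
        if 0 ≤ (i : Int) - y_off ∧ (i : Int) - y_off < (src.length : Int) ∧
            0 ≤ q.1 - x_off ∧ q.1 - x_off < ((src.getD ((i : Int) - y_off).toNat []).length : Int) ∧
            ((src.getD ((i : Int) - y_off).toNat []).getD (q.1 - x_off).toNat (0, 0, 0, 0)).2.2.2 > 0
        then (src.getD ((i : Int) - y_off).toNat []).getD (q.1 - x_off).toNat (0, 0, 0, 0)
        else q.2) (PySem.List.enumerate drow) := by
  by_cases houter : 0 ≤ (i : Int) - y_off ∧ (i : Int) - y_off < (src.length : Int)
  · rw [if_pos houter]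
    apply List.ext_getElem?
    intro j
    rw [List.getElem?_map, PySem.List.getElem?_enumerate]
    by_cases hj : j < drow.length
    · have hpj : j < (paint drow 0 (src.getD ((i : Int) - y_off).toNat []) x_off).length := by
        rw [paint_length]; exact hj
      rw [List.getElem?_eq_getElem hpj, List.getElem?_eq_getElem hj]
      simp only [Option.map_some, zero_add]
      congr 1
      rw [← List.getD_eq_getElem (paint drow 0 (src.getD ((i : Int) - y_off).toNat []) x_off)
        (0, 0, 0, 0) hpj, paint_getD _ drow 0 x_off j hj]
      simp only [sub_zero]
      rw [List.getD_eq_getElem drow (0, 0, 0, 0) hj]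
      exact if_congr (by tauto) rfl rfl
    · rw [List.getElem?_eq_none (by rw [paint_length]; omega),
        List.getElem?_eq_none (l := drow) (by omega)]
      rfl
  · rw [if_neg houter]
    rw [List.map_congr_left (fun q _ => if_neg (fun h => houter ⟨h.1, h.2.1⟩))]
    exact (PySem.List.map_snd_enumerate drow 0).symm

theorem overlay_eq (dst src : List (List (Int × Int × Int × Int))) (x_off y_off : Int) :
    overlay dst src x_off y_off = overlay_alt dst src x_off y_off := by
  apply List.ext_getElem?
  intro i
  simp only [overlay, overlay_alt, List.getElem?_map, PySem.List.getElem?_enumerate]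
  by_cases hi : i < dst.length
  · have hL : i < (overlayOuter dst 0 src x_off y_off).length := by
      rw [outer_length]; exact hi
    rw [List.getElem?_eq_getElem hL, List.getElem?_eq_getElem hi]
    simp only [Option.map_some, zero_add]
    congr 1
    rw [← List.getD_eq_getElem (overlayOuter dst 0 src x_off y_off) [] hL,
      outer_getD src dst 0 x_off y_off i hi]
    simp only [sub_zero, List.getD_eq_getElem dst [] hi]
    exact row_eq src x_off y_off i dst[i]
  · rw [List.getElem?_eq_none (by rw [outer_length]; omega),
      List.getElem?_eq_none (by omega)]
    rfl

-- ===== VERDICT (by name: the statement is the Claim_ definition above) =====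
theorem overlay_spec : Claim_equal_overlay := by
  intro dst src x_off y_off _
  unfold Spec_overlay
  exact overlay_eq dst src x_off y_off
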